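-- pv_equiv track=rewrite | github.com/ThinkOffApp/multiquark-lattice-qcd | gpt/applications/hmc/su2_2q_signal_scan.py | single_measurement_step_count
-- ===== SOURCE A (Python) =====
-- def single_measurement_step_count(time_dirs, orientations, nd, Rs, Ts, flux_r_perp_max, polyakov_dirs_count=0):
--     """Estimated fine-grained steps for one single_measurement() call."""
--     if not time_dirs:
--         return 1
--     orientations_by_tdir = {tdir: 0 for tdir in time_dirs}
--     for td, _ in orientations:
--         if td in orientations_by_tdir:
--             orientations_by_tdir[td] += 1
--
--     loop_steps = 0
--     flux_steps = 0
--     flux_shift_count_per_orientation = 1 + 2 * max(0, nd - 2) * max(0, flux_r_perp_max)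
--     for tdir in time_dirs:
--         n_or = orientations_by_tdir.get(tdir, 0)
--         if n_or <= 0:
--             continue
--         loop_steps += n_or * len(Rs) * len(Ts)
--         flux_steps += n_or * flux_shift_count_per_orientation
--     poly_steps = max(0, int(polyakov_dirs_count))
--     return max(1, loop_steps + flux_steps + poly_steps)
-- ===== SOURCE B (Python) =====
-- def single_measurement_step_count(time_dirs, orientations, nd, Rs, Ts, flux_r_perp_max, polyakov_dirs_count=0):
--     """Estimated fine-grained steps for one single_measurement() call."""
--     if not time_dirs:
--         return 1
--     # multiplicity of each time direction
--     tmult = {}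
--     for td in time_dirs:
--         tmult[td] = tmult.get(td, 0) + 1
--     # one pass over orientations, each weighted by its time-dir's multiplicity
--     total = 0
--     for td, _ in orientations:
--         total += tmult.get(td, 0)
--     per_orientation = len(Rs) * len(Ts) + 1 + 2 * max(0, nd - 2) * max(0, flux_r_perp_max)
--     return max(1, total * per_orientation + max(0, int(polyakov_dirs_count)))
-- ===== Notes on version B (the rewrite author's own statement) =====
-- stated objective: alternative
-- what changed: B transposes the double sum: instead of counting orientations per time_dir and looping over time_dirs with two accumulators, it builds a multiplicity table of time_dirs and makes one pass over orientations, weighting each by its time-dir's multiplicity, then applies a single closed-form max(1, total*per_orientation + poly).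
import Mathlib
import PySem

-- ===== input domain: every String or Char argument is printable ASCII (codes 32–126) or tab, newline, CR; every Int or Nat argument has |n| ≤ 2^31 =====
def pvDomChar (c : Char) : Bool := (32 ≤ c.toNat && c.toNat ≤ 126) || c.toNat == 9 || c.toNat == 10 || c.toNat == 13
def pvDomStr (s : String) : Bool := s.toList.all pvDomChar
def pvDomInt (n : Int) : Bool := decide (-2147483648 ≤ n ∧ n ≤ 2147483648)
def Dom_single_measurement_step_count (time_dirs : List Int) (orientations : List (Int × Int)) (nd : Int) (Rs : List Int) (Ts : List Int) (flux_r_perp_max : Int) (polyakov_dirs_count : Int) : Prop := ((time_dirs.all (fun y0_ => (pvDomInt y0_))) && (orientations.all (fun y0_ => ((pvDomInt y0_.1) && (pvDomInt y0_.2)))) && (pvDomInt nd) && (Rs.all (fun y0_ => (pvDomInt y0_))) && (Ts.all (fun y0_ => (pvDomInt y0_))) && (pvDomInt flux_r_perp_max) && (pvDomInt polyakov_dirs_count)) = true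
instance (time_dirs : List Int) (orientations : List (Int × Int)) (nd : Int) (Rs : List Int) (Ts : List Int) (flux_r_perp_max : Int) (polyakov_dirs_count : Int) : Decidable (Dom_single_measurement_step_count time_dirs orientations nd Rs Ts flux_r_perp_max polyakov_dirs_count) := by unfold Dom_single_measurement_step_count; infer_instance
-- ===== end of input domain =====

-- B transposes A's double sum: a multiplicity table of time_dirs plus one weighted pass over
-- orientations and a single closed form, instead of A's per-time_dir orientation counts and
-- guarded two-accumulator loop (objective: alternative; same asymptotic cost).


-- ===== PORT A =====
def single_measurement_step_count (time_dirs : List Int) (orientations : List (Int × Int)) (nd : Int) (Rs : List Int) (Ts : List Int) (flux_r_perp_max : Int) (polyakov_dirs_count : Int) : Int :=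
  if time_dirs = [] then 1
  else
    -- orientations_by_tdir = {tdir: 0 for tdir in time_dirs}
    let d0 : PySem.Dict Int Int := time_dirs.foldl (fun d t => d.insert t 0) PySem.Dict.empty
    -- for td, _ in orientations: if td in dict: dict[td] += 1
    let d1 : PySem.Dict Int Int :=
      orientations.foldl (fun d p => if d.contains p.1 then d.modify p.1 0 (· + 1) else d) d0
    let flux_shift_count_per_orientation : Int :=
      1 + 2 * max 0 (nd - 2) * max 0 flux_r_perp_max
    -- loop_steps / flux_steps accumulators over time_dirs
    let st : Int × Int :=
      time_dirs.foldl (fun (s : Int × Int) tdir =>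
        let n_or := d1.getD tdir 0
        if n_or ≤ 0 then s
        else (s.1 + n_or * (Rs.length : Int) * (Ts.length : Int),
              s.2 + n_or * flux_shift_count_per_orientation)) (0, 0)
    let poly_steps : Int := max 0 polyakov_dirs_count
    max 1 (st.1 + st.2 + poly_steps)

-- ===== PORT B =====
def single_measurement_step_count_alt (time_dirs : List Int) (orientations : List (Int × Int)) (nd : Int) (Rs : List Int) (Ts : List Int) (flux_r_perp_max : Int) (polyakov_dirs_count : Int) : Int :=
  if time_dirs = [] then 1
  else
    -- tmult[td] = tmult.get(td, 0) + 1, over time_dirs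
    let tmult : PySem.Dict Int Int :=
      time_dirs.foldl (fun d t => d.insert t (d.getD t 0 + 1)) PySem.Dict.empty
    -- one pass over orientations: total += tmult.get(td, 0)
    let total : Int := orientations.foldl (fun s p => s + tmult.getD p.1 0) 0
    let per_orientation : Int :=
      (Rs.length : Int) * (Ts.length : Int) + 1 + 2 * max 0 (nd - 2) * max 0 flux_r_perp_max
    max 1 (total * per_orientation + max 0 polyakov_dirs_count)

-- ===== PRECONDITION & SPEC =====
def Spec_single_measurement_step_count (time_dirs : List Int) (orientations : List (Int × Int)) (nd : Int) (Rs : List Int) (Ts : List Int) (flux_r_perp_max : Int) (polyakov_dirs_count : Int) (out : Int) : Prop := out = single_measurement_step_count_alt time_dirs orientations nd Rs Ts flux_r_perp_max polyakov_dirs_count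
instance (time_dirs : List Int) (orientations : List (Int × Int)) (nd : Int) (Rs : List Int) (Ts : List Int) (flux_r_perp_max : Int) (polyakov_dirs_count : Int) (out : Int) : Decidable (Spec_single_measurement_step_count time_dirs orientations nd Rs Ts flux_r_perp_max polyakov_dirs_count out) := by unfold Spec_single_measurement_step_count; infer_instance

-- ===== CLAIM (what is proved, stated in full; the proofs are below) =====
def Claim_equal_single_measurement_step_count : Prop := ∀ (time_dirs : List Int) (orientations : List (Int × Int)) (nd : Int) (Rs : List Int) (Ts : List Int) (flux_r_perp_max : Int) (polyakov_dirs_count : Int), Dom_single_measurement_step_count time_dirs orientations nd Rs Ts flux_r_perp_max polyakov_dirs_count → Spec_single_measurement_step_count time_dirs orientations nd Rs Ts flux_r_perp_max polyakov_dirs_count (single_measurement_step_count time_dirs orientations nd Rs Ts flux_r_perp_max polyakov_dirs_count)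

-- ===== LEMMAS AND PROOFS =====

-- A's seed dict: every value is 0.
lemma seed_getD (l : List Int) (d : PySem.Dict Int Int) (t : Int) (h : d.getD t 0 = 0) :
    (l.foldl (fun d t => d.insert t 0) d).getD t 0 = 0 := by
  induction l generalizing d with
  | nil => simpa using h
  | cons x xs ih =>
      simp only [List.foldl_cons]
      exact ih _ (by rw [PySem.Dict.getD_insert]; split <;> simp [h])

-- A's seed dict: contains exactly the elements inserted so far.
lemma seed_contains (l : List Int) (d : PySem.Dict Int Int) (t : Int) :
    (l.foldl (fun d t => d.insert t 0) d).contains t = (decide (t ∈ l) || d.contains t) := by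
  induction l generalizing d with
  | nil => simp
  | cons x xs ih =>
      simp only [List.foldl_cons, ih, PySem.Dict.contains_insert, List.mem_cons]
      by_cases hx : t = x
      · simp [hx]
      · have hb : (t == x) = false := beq_eq_false_iff_ne.mpr hx
        simp [hx, hb]

-- A's counting pass: the guard is stable (modify keeps the key set), so the count at t
-- grows by the number of matching orientations exactly when t is in the dict.
lemma countA_getD (l : List (Int × Int)) (d : PySem.Dict Int Int) (t : Int) :
    (l.foldl (fun d p => if d.contains p.1 then d.modify p.1 0 (· + 1) else d) d).getD t 0
      = d.getD t 0 + (if d.contains t then ((l.map Prod.fst).count t : Int) else 0) := by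
  induction l generalizing d with
  | nil => simp
  | cons p ps ih =>
      simp only [List.foldl_cons]
      by_cases hg : d.contains p.1 = true
      · rw [if_pos hg, ih]
        have hc : ∀ x, (d.modify p.1 0 (· + 1)).contains x = d.contains x := by
          intro x
          rw [PySem.Dict.contains_modify]
          by_cases h : x = p.1
          · simp [h, hg]
          · simp [beq_iff_eq, h]
        rw [hc t, PySem.Dict.getD_modify]
        by_cases ht : t = p.1
        · subst ht
          rw [if_pos rfl, if_pos hg, if_pos hg]
          simp
          ring
        · rw [if_neg ht]
          by_cases hdt : d.contains t = true
          · simp only [if_pos hdt]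
            have : (p.1 :: ps.map Prod.fst).count t = (ps.map Prod.fst).count t := by
              simp [Ne.symm ht]
            simp [List.map_cons, this]
          · simp [hdt]
      · rw [if_neg hg, ih]
        by_cases hdt : d.contains t = true
        · have ht : t ≠ p.1 := fun h => hg (h ▸ hdt)
          have : (p.1 :: ps.map Prod.fst).count t = (ps.map Prod.fst).count t := by
            simp [Ne.symm ht]
          simp [hdt, List.map_cons, this]
        · simp [hdt]

-- A's two-accumulator loop versus the plain sum, pointwise: on keys whose stored value is the
-- (nonnegative) count, the skip-if-nonpositive guard only skips zero contributions.
lemma loop_eq (cnt : Int → Int) (hcnt : ∀ t, 0 ≤ cnt t) (R T f : Int) :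
    ∀ (l : List Int) (a b : Int) (d : PySem.Dict Int Int), (∀ t ∈ l, d.getD t 0 = cnt t) →
    l.foldl (fun (s : Int × Int) tdir =>
        if d.getD tdir 0 ≤ 0 then s
        else (s.1 + d.getD tdir 0 * R * T, s.2 + d.getD tdir 0 * f)) (a, b)
      = (a + (l.map cnt).sum * R * T, b + (l.map cnt).sum * f) := by
  intro l
  induction l with
  | nil => intro a b d _; simp
  | cons x xs ih =>
      intro a b d h
      have hx : d.getD x 0 = cnt x := h x (by simp)
      simp only [List.foldl_cons, hx, List.map_cons, List.sum_cons]
      by_cases hz : cnt x ≤ 0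
      · have hx0 : cnt x = 0 := le_antisymm hz (hcnt x)
        rw [if_pos hz]
        rw [ih a b d (fun t ht => h t (by simp [ht]))]
        simp [hx0]
      · rw [if_neg hz]
        rw [ih _ _ d (fun t ht => h t (by simp [ht]))]
        simp only [Prod.mk.injEq]
        constructor <;> ring

-- B's multiplicity table at any key is the count of that key in the list.
lemma tmult_getD (l : List Int) (d : PySem.Dict Int Int) (t : Int) :
    (l.foldl (fun d x => d.insert x (d.getD x 0 + 1)) d).getD t 0
      = d.getD t 0 + (l.count t : Int) := by
  induction l generalizing d with
  | nil => simp
  | cons x xs ih =>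
      simp only [List.foldl_cons, ih, PySem.Dict.getD_insert]
      by_cases ht : t = x
      · subst ht
        simp
        ring
      · have : (x :: xs).count t = xs.count t := by simp [Ne.symm ht]
        simp [ht, this]

-- B's total loop is the plain sum of the per-orientation weights.
lemma totalB_eq (d : PySem.Dict Int Int) :
    ∀ (l : List (Int × Int)) (a : Int),
    l.foldl (fun s p => s + d.getD p.1 0) a = a + (l.map (fun p => d.getD p.1 0)).sum := by
  intro l
  induction l with
  | nil => intro a; simp
  | cons p ps ih =>
      intro a
      simp only [List.foldl_cons, List.map_cons, List.sum_cons, ih]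
      ring

-- Summed indicator is the count.
lemma sum_indicator (m : Int) :
    ∀ (L : List Int), (L.map (fun t => if t = m then (1 : Int) else 0)).sum = (L.count m : Int) := by
  intro L
  induction L with
  | nil => simp
  | cons x xs ih =>
      by_cases hx : x = m
      · subst hx
        rw [List.map_cons, List.sum_cons, if_pos rfl, ih, List.count_cons_self]
        push_cast
        ring
      · have hc : (x :: xs).count m = xs.count m := List.count_cons_of_ne hx
        rw [List.map_cons, List.sum_cons, if_neg hx, ih, hc]
        ring

-- Double counting: summing M-counts over L equals summing L-counts over M.
lemma count_exchange (L : List Int) :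
    ∀ (M : List Int),
    (L.map (fun t => ((M.count t : Nat) : Int))).sum = (M.map (fun m => ((L.count m : Nat) : Int))).sum := by
  intro M
  induction M with
  | nil => simp
  | cons m ms ih =>
      have hsplit : (L.map (fun t => (((m :: ms).count t : Nat) : Int))).sum
          = (L.map (fun t => ((ms.count t : Nat) : Int))).sum
            + (L.map (fun t => if t = m then (1 : Int) else 0)).sum := by
        rw [← List.sum_map_add]
        apply congrArg
        apply List.map_congr_left
        intro t _
        by_cases ht : t = m
        · subst ht
          simp only [List.count_cons_self]
          push_cast
          ring
        · have hb : (m == t) = false := beq_eq_false_iff_ne.mpr (Ne.symm ht)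
          rw [List.count_cons, hb]
          simp [ht]
      rw [hsplit, ih, sum_indicator]
      simp [List.map_cons]
      ring

-- ===== VERDICT (by name: the statement is the Claim_ definition above) =====
theorem single_measurement_step_count_spec : Claim_equal_single_measurement_step_count := by
  intro time_dirs orientations nd Rs Ts flux_r_perp_max polyakov_dirs_count _
  unfold Spec_single_measurement_step_count single_measurement_step_count single_measurement_step_count_alt
  by_cases he : time_dirs = []
  · simp [he]
  · rw [if_neg he, if_neg he]
    dsimp only
    set cnt : Int → Int := fun t => ((orientations.map Prod.fst).count t : Int) with hcntdef
    have hcnt_nonneg : ∀ t, 0 ≤ cnt t := fun t => Int.natCast_nonneg _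
    -- A's dict agrees with cnt on members of time_dirs
    have hA : ∀ t ∈ time_dirs,
        ((orientations.foldl (fun d p => if d.contains p.1 then d.modify p.1 0 (· + 1) else d)
          (time_dirs.foldl (fun d t => d.insert t 0) PySem.Dict.empty)).getD t 0) = cnt t := by
      intro t ht
      rw [countA_getD]
      rw [seed_getD _ _ _ (by simp [PySem.Dict.getD_empty])]
      rw [seed_contains]
      simp [ht, hcntdef]
    rw [loop_eq cnt hcnt_nonneg _ _ _ time_dirs 0 0 _ hA]
    -- B's side: tmult is the multiplicity of time_dirs; total transposes the sum
    rw [totalB_eq]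
    have hmap : (orientations.map (fun p =>
        ((time_dirs.foldl (fun d x => d.insert x (d.getD x 0 + 1)) PySem.Dict.empty).getD p.1 0))).sum
        = ((orientations.map Prod.fst).map (fun m => ((time_dirs.count m : Nat) : Int))).sum := by
      rw [List.map_map]
      apply congrArg
      apply List.map_congr_left
      intro p _
      rw [tmult_getD]
      simp [PySem.Dict.getD_empty]
    rw [hmap]
    rw [show (time_dirs.map cnt)
        = (time_dirs.map (fun t => (((orientations.map Prod.fst).count t : Nat) : Int))) from rfl,
      count_exchange]
    dsimp only
    congr 1
    ring
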